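-- pv_equiv track=rewrite | github.com/Zhanna2603/GOA-course-11 | Day 72/Homework/codewars5.py | abbreviate
-- ===== SOURCE A (Python) =====
-- def abbreviate(s):
--     result = []
--     i = 0
--     n = len(s)
--
--     while i < n:
--         if s[i].isalpha():
--             start = i
--             while i < n and s[i].isalpha():
--                 i += 1
--             word = s[start:i]
--             if len(word) >= 4:
--                 abbreviated = f"{word[0]}{len(word) - 2}{word[-1]}"
--                 result.append(abbreviated)
--             else:
--                 result.append(word)
--         else:
--             result.append(s[i])
--             i += 1
--
--     return ''.join(result)
-- ===== SOURCE B (Python) =====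
-- def abbreviate(s):
--     def flush(buf):
--         if len(buf) >= 4:
--             return f"{buf[0]}{len(buf) - 2}{buf[-1]}"
--         return buf
--
--     pieces = []
--     buf = ''
--     for c in s:
--         if c.isalpha():
--             buf += c
--         else:
--             pieces.append(flush(buf))
--             pieces.append(c)
--             buf = ''
--     pieces.append(flush(buf))
--     return ''.join(pieces)
-- ===== Notes on version B (the rewrite author's own statement) =====
-- stated objective: simpler
-- what changed: Replaced the index-based scan with a nested inner while-loop by a single flat for-loop over the characters that accumulates the current alphabetic run in a buffer and flushes it at each non-letter and at the end.
import Mathlib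
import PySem

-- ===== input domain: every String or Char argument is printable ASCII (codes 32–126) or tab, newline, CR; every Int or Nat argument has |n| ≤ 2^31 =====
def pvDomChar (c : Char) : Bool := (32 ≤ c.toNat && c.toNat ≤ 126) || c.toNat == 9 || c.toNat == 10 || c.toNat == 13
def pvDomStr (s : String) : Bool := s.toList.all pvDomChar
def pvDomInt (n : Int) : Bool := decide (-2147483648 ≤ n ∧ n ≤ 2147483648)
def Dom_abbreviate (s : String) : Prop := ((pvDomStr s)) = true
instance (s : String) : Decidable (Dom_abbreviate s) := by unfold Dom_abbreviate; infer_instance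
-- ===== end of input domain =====

-- B replaces A's index-based scan with nested inner while by one flat pass with a run buffer (simpler; same O(n)).

-- shared formatting of the f-string f"{w[0]}{len(w)-2}{w[-1]}" (both Pythons contain this literal f-string; only reached on words of length ≥ 4)
def pvFstring (w : List Char) : List Char :=
  w.head! :: PySem.Int.toChars ((w.length : Int) - 2) ++ [w.getLast!]

-- ===== PORT A =====
-- A's outer while over index i; the inner while collecting the maximal alpha run is takeWhile/dropWhile over the same chars
def abbrevLoopA : List Char → List (List Char)
  | [] => []
  | c :: rest =>
    if PySem.Chars.isalpha c then
      let word := c :: rest.takeWhile PySem.Chars.isalpha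
      (if 4 ≤ word.length then pvFstring word else word)
        :: abbrevLoopA (rest.dropWhile PySem.Chars.isalpha)
    else
      [c] :: abbrevLoopA rest
  termination_by cs => cs.length
  decreasing_by
    · simpa using Nat.lt_succ_of_le (List.length_dropWhile_le _ _)
    · simp

-- ''.join(result) concatenates the pieces: flatten is exact for the empty separator
def abbreviate (s : String) : String :=
  String.ofList (abbrevLoopA s.toList).flatten

-- ===== PORT B =====
def flushB (buf : List Char) : List Char :=
  if 4 ≤ buf.length then pvFstring buf else buf

-- one step of B's for-loop: state = (pieces so far, current alpha-run buffer)
def stepB (st : List (List Char) × List Char) (c : Char) : List (List Char) × List Char :=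
  if PySem.Chars.isalpha c then (st.1, st.2 ++ [c])
  else (st.1 ++ [flushB st.2, [c]], [])

def abbreviate_alt (s : String) : String :=
  let fin := s.toList.foldl stepB ([], [])
  String.ofList ((fin.1 ++ [flushB fin.2]).flatten)

-- ===== PRECONDITION & SPEC =====
def Spec_abbreviate (s : String) (out : String) : Prop := out = abbreviate_alt s
instance (s : String) (out : String) : Decidable (Spec_abbreviate s out) := by unfold Spec_abbreviate; infer_instance

-- ===== CLAIM (what is proved, stated in full; the proofs are below) =====
def Claim_equal_abbreviate : Prop := ∀ (s : String), Dom_abbreviate s → Spec_abbreviate s (abbreviate s)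

-- ===== LEMMAS AND PROOFS =====

-- A's output splits at the first maximal alpha run (case analysis on the head; flushB [] = [])
theorem loopA_split (cs : List Char) :
    (abbrevLoopA cs).flatten
      = flushB (cs.takeWhile PySem.Chars.isalpha)
        ++ (abbrevLoopA (cs.dropWhile PySem.Chars.isalpha)).flatten := by
  cases cs with
  | nil => simp [abbrevLoopA, flushB]
  | cons c rest =>
    by_cases h : PySem.Chars.isalpha c
    · simp [abbrevLoopA, h, flushB]
    · simp [abbrevLoopA, h, flushB]

-- main invariant of B's fold against A's scan
theorem foldB_invariant :
    ∀ (n : Nat) (cs : List Char), cs.length ≤ n → ∀ (ps : List (List Char)) (buf : List Char),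
      (((cs.foldl stepB (ps, buf)).1 ++ [flushB (cs.foldl stepB (ps, buf)).2]).flatten)
        = ps.flatten ++ flushB (buf ++ cs.takeWhile PySem.Chars.isalpha)
            ++ (abbrevLoopA (cs.dropWhile PySem.Chars.isalpha)).flatten := by
  intro n
  induction n with
  | zero =>
    intro cs hcs ps buf
    have : cs = [] := List.length_eq_zero_iff.mp (Nat.le_zero.mp hcs)
    subst this
    simp [abbrevLoopA]
  | succ n ih =>
    intro cs hcs ps buf
    cases cs with
    | nil => simp [abbrevLoopA]
    | cons c rest =>
      by_cases h : PySem.Chars.isalpha c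
      · have := ih rest (by simpa using Nat.le_of_succ_le_succ hcs) ps (buf ++ [c])
        simp [List.foldl_cons, stepB, h] at this ⊢
        rw [this]
      · have := ih rest (by simpa using Nat.le_of_succ_le_succ hcs)
          (ps ++ [flushB buf, [c]]) []
        simp [List.foldl_cons, stepB, h] at this ⊢
        rw [this, abbrevLoopA]
        simp [h, loopA_split rest]

-- ===== VERDICT (by name: the statement is the Claim_ definition above) =====
theorem abbreviate_spec : Claim_equal_abbreviate := by
  intro s _
  show String.ofList (abbrevLoopA s.toList).flatten
      = String.ofList (((s.toList.foldl stepB ([], [])).1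
          ++ [flushB (s.toList.foldl stepB ([], [])).2]).flatten)
  have h := foldB_invariant s.toList.length s.toList le_rfl [] []
  simp only [List.flatten_nil, List.nil_append] at h
  rw [h, ← loopA_split]
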